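-- pv_equiv track=rewrite | github.com/Dario-Arcos/ai-framework | hooks/test_scen_023.py | _function_line_count
-- ===== SOURCE A (Python) =====
-- def _function_line_count(src, name):
--     """Return LOC of a top-level def `name` — from `def name(` to next
--     top-level `def ` (or EOF), excluding the closing newlines."""
--     lines = src.splitlines()
--     start = None
--     for idx, line in enumerate(lines):
--         if line.startswith(f"def {name}("):
--             start = idx
--             break
--     if start is None:
--         return 0
--     end = len(lines)
--     for idx in range(start + 1, len(lines)):
--         if lines[idx].startswith("def ") or lines[idx].startswith("class "):
--             end = idx
--             break
--     return end - start
-- ===== SOURCE B (Python) =====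
-- def _function_line_count(src, name):
--     lines = src.splitlines()
--     # table of all top-level block boundaries (index, line)
--     bnds = [(i, l) for i, l in enumerate(lines)
--             if l.startswith("def ") or l.startswith("class ")]
--     target = "def " + name + "("
--     for p, (i, l) in enumerate(bnds):
--         if l.startswith(target):
--             end = bnds[p + 1][0] if p + 1 < len(bnds) else len(lines)
--             return end - i
--     return 0
-- ===== Notes on version B (the rewrite author's own statement) =====
-- stated objective: alternative
-- what changed: B materializes the table of all top-level block boundaries (def/class line indices) in one pass and answers by arithmetic on adjacent table entries, instead of A's two targeted forward scans over the raw lines.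
import Mathlib
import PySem

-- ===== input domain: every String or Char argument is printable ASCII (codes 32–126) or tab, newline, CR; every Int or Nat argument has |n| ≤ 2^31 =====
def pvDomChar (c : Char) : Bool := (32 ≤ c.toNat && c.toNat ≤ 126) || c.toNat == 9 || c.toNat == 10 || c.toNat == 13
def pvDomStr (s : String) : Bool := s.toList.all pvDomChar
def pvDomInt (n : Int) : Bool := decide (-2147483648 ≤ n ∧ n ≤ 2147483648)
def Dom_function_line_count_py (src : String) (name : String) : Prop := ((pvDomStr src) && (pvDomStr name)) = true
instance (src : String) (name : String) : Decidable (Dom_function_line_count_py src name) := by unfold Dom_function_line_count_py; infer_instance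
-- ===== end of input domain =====

-- B builds the table of all top-level boundary lines once and answers by table arithmetic;
-- alternative decomposition, same asymptotic cost.

-- ===== PORT A =====
-- shared predicate: a top-level block boundary line
def pvBnd (l : String) : Bool :=
  PySem.Str.startswith l "def " || PySem.Str.startswith l "class "

-- A's first loop: for idx, line in enumerate(lines): if line.startswith(target): start = idx; break
def pvFindStart (target : String) : List (Int × String) → Option Int
  | [] => none
  | (i, l) :: rest => if PySem.Str.startswith l target then some i else pvFindStart target rest

-- A's second loop: for idx in range(start+1, len(lines)): if boundary: end = idx; break  (end starts as len(lines))
def pvFindEnd (lines : List String) (dflt : Int) : List Int → Int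
  | [] => dflt
  | idx :: rest =>
      if pvBnd (PySem.List.pyGetD lines idx "") then idx else pvFindEnd lines dflt rest

def function_line_count_py (src : String) (name : String) : Int :=
  let lines := PySem.Str.splitlines src
  match pvFindStart ("def " ++ name ++ "(") (PySem.List.enumerate lines) with
  | none => 0
  | some start =>
      pvFindEnd lines (lines.length : Int)
        (PySem.List.pyRange (start + 1) (lines.length : Int) 1) - start

-- ===== PORT B =====
-- B's boundary predicate (same text as A's, but B's port keeps its own copy)
def pvBndB (l : String) : Bool :=
  PySem.Str.startswith l "def " || PySem.Str.startswith l "class "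

-- B's loop over the boundary table: at the matching entry, the next table entry (or EOF) is the end
def pvGo (dflt : Int) (target : String) : List (Int × String) → Int
  | [] => 0
  | (i, l) :: rest =>
      if PySem.Str.startswith l target then
        (match rest with
         | (j, _) :: _ => j
         | [] => dflt) - i
      else pvGo dflt target rest

def function_line_count_py_alt (src : String) (name : String) : Int :=
  let lines := PySem.Str.splitlines src
  let bnds := (PySem.List.enumerate lines).filter (fun p => pvBndB p.2)
  pvGo (lines.length : Int) ("def " ++ name ++ "(") bnds

-- ===== PRECONDITION & SPEC =====
def Spec_function_line_count_py (src : String) (name : String) (out : Int) : Prop := out = function_line_count_py_alt src name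
instance (src : String) (name : String) (out : Int) : Decidable (Spec_function_line_count_py src name out) := by unfold Spec_function_line_count_py; infer_instance

-- ===== CLAIM (what is proved, stated in full; the proofs are below) =====
def Claim_equal_function_line_count_py : Prop := ∀ (src : String) (name : String), Dom_function_line_count_py src name → Spec_function_line_count_py src name (function_line_count_py src name)

-- ===== LEMMAS AND PROOFS =====

theorem pvBndB_eq : pvBndB = pvBnd := rfl

-- A-shaped scan fused into one recursion over the enumerated lines
def pvA (dflt : Int) (target : String) : List (Int × String) → Int
  | [] => 0
  | (i, l) :: rest =>
      if PySem.Str.startswith l target then pvFindEnd2 dflt rest - i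
      else pvA dflt target rest
where
  pvFindEnd2 (dflt : Int) : List (Int × String) → Int
  | [] => dflt
  | (i, l) :: rest => if pvBnd l then i else pvFindEnd2 dflt rest

theorem findEnd2_filter (dflt : Int) (rest : List (Int × String)) :
    pvA.pvFindEnd2 dflt rest =
      (match rest.filter (fun p => pvBnd p.2) with
       | (j, _) :: _ => j
       | [] => dflt) := by
  induction rest with
  | nil => rfl
  | cons p rest ih =>
      obtain ⟨i, l⟩ := p
      by_cases h : pvBnd l
      · simp [pvA.pvFindEnd2, List.filter, h]
      · simp [pvA.pvFindEnd2, List.filter, h, ih]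

theorem go_filter (dflt : Int) (target : String)
    (htgt : ∀ l : String, PySem.Str.startswith l target = true → pvBnd l = true)
    (ps : List (Int × String)) :
    pvGo dflt target (ps.filter (fun p => pvBnd p.2)) = pvA dflt target ps := by
  induction ps with
  | nil => rfl
  | cons p ps ih =>
      obtain ⟨i, l⟩ := p
      by_cases ht : PySem.Str.startswith l target
      all_goals have ht' := ht; simp only [PySem.Str.startswith_eq] at ht'
      · have hb : pvBnd l = true := htgt l ht
        simp [List.filter, hb, pvGo, pvA, ht', findEnd2_filter]
      · by_cases hb : pvBnd l
        · simp [List.filter, hb, pvGo, pvA, ht', ih]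
        · simp [List.filter, hb, pvA, ht', ih]

theorem findEnd_bridge (lines : List String) (dflt : Int) :
    ∀ (ys : List String) (k : Nat), lines.drop k = ys →
    pvFindEnd lines dflt (PySem.List.pyRange (k : Int) (lines.length : Int) 1) =
      pvA.pvFindEnd2 dflt (PySem.List.enumerate ys (k : Int)) := by
  intro ys
  induction ys with
  | nil =>
      intro k hk
      have hlen : lines.length ≤ k := by
        by_contra h
        have := List.drop_eq_nil_iff.mp hk
        omega
      rw [PySem.List.pyRange_one_eq_nil (by exact_mod_cast hlen)]
      rfl
  | cons y ys ih =>
      intro k hk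
      have hklt : k < lines.length := by
        by_contra h
        rw [List.drop_eq_nil_of_le (by omega)] at hk
        simp at hk
      have hget : lines[k]? = some y := by
        have h0 : (lines.drop k)[0]? = some y := by rw [hk]; rfl
        simpa [List.getElem?_drop] using h0
      have hrange : PySem.List.pyRange (k : Int) (lines.length : Int) 1 =
          (k : Int) :: PySem.List.pyRange ((k : Int) + 1) (lines.length : Int) 1 :=
        PySem.List.pyRange_one_cons (by exact_mod_cast hklt)
      have hgetD : PySem.List.pyGetD lines (k : Int) "" = y := by
        rw [PySem.List.pyGetD_natCast]
        simp [hget]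

      have hdropSucc : lines.drop (k + 1) = ys := by
        have : (lines.drop k).tail = ys := by rw [hk]; rfl
        simpa [List.tail_drop] using this
      rw [hrange]
      simp only [PySem.List.enumerate_cons, pvFindEnd, pvA.pvFindEnd2, hgetD]
      by_cases hb : pvBnd y
      · simp [hb]
      · simp [hb]
        have := ih (k + 1) hdropSucc
        simpa [Nat.cast_add] using this

theorem phaseA (target : String) (lines : List String) :
    ∀ (ys : List String) (k : Nat), lines.drop k = ys →
    (match pvFindStart target (PySem.List.enumerate ys (k : Int)) with
     | none => 0
     | some start =>
         pvFindEnd lines (lines.length : Int)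
           (PySem.List.pyRange (start + 1) (lines.length : Int) 1) - start) =
    pvA (lines.length : Int) target (PySem.List.enumerate ys (k : Int)) := by
  intro ys
  induction ys with
  | nil => intro k _; rfl
  | cons y ys ih =>
      intro k hk
      have hklt : k < lines.length := by
        by_contra h
        rw [List.drop_eq_nil_of_le (by omega)] at hk
        simp at hk
      have hdropSucc : lines.drop (k + 1) = ys := by
        have : (lines.drop k).tail = ys := by rw [hk]; rfl
        simpa [List.tail_drop] using this
      simp only [PySem.List.enumerate_cons]
      by_cases ht : PySem.Str.startswith y target
      · simp only [pvFindStart, pvA, ht, if_pos]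
        have hbr := findEnd_bridge lines (lines.length : Int) ys (k + 1) hdropSucc
        simp only [Nat.cast_add, Nat.cast_one] at hbr
        simp [hbr]
      · simp only [pvFindStart, pvA, ht]
        have := ih (k + 1) hdropSucc
        simpa [Nat.cast_add] using this

theorem tgt_bnd (name : String) (l : String)
    (h : PySem.Str.startswith l ("def " ++ name ++ "(") = true) : pvBnd l = true := by
  have hpre : ("def ").toList <+: ("def " ++ name ++ "(").toList := by
    simp [String.toList_append]
  have h1 : ("def " ++ name ++ "(").toList <+: l.toList := by
    simpa [PySem.Str.startswith_eq, PySem.Chars.startswith_iff] using h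
  have hdl : ("def ").toList <+: l.toList := hpre.trans h1
  simp only [pvBnd, PySem.Str.startswith_eq, PySem.Chars.startswith_iff, Bool.or_eq_true]
  exact Or.inl (by simpa using hdl)

-- ===== VERDICT (by name: the statement is the Claim_ definition above) =====
theorem function_line_count_py_spec : Claim_equal_function_line_count_py := by
  intro src name _
  unfold Spec_function_line_count_py function_line_count_py function_line_count_py_alt
  have h0 := phaseA ("def " ++ name ++ "(") (PySem.Str.splitlines src)
      (PySem.Str.splitlines src) 0 (by simp)
  have hg := go_filter (((PySem.Str.splitlines src).length : Int)) ("def " ++ name ++ "(")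
      (tgt_bnd name) (PySem.List.enumerate (PySem.Str.splitlines src) 0)
  rw [pvBndB_eq]
  exact h0.trans hg.symm
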